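-- pv_equiv track=rewrite | github.com/ElrikPiro/advanced-task-manager | backend/src/taskjsonproviders/ObsidianVaultTaskJsonProvider.py | __getFileHeader
-- ===== SOURCE A (Python) =====
-- def __getFileHeader(file: list[str]) -> dict[str, str]:
--     header: dict[str, str] = {}
--     inHeader = False
--     for line in file:
--         if line.split('\n')[0].strip() == "---":
--             if inHeader:
--                 break
--             else:
--                 inHeader = True
--                 continue
--
--         if inHeader:
--             splittedLine = line.split(":")
--             key = splittedLine[0].strip()
--             value = splittedLine[-1].strip()
--             header[key] = value
--     return header
-- ===== SOURCE B (Python) =====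
-- def __getFileHeader(file: list[str]) -> dict[str, str]:
--     def is_fence(line: str) -> bool:
--         return line.split('\n')[0].strip() == "---"
--     fences = [i for i, line in enumerate(file) if is_fence(line)]
--     if not fences:
--         return {}
--     start = fences[0]
--     end = fences[1] if len(fences) > 1 else len(file)
--     return {line.split(":")[0].strip(): line.split(":")[-1].strip()
--             for line in file[start + 1:end]}
-- ===== Notes on version B (the rewrite author's own statement) =====
-- stated objective: alternative
-- what changed: B first collects the indices of all fence lines, slices the lines strictly between the first fence and the second fence (or end of file), and builds the dict in one comprehension over that slice, instead of A's single loop threading an inHeader boolean flag with break/continue.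
import Mathlib
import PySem

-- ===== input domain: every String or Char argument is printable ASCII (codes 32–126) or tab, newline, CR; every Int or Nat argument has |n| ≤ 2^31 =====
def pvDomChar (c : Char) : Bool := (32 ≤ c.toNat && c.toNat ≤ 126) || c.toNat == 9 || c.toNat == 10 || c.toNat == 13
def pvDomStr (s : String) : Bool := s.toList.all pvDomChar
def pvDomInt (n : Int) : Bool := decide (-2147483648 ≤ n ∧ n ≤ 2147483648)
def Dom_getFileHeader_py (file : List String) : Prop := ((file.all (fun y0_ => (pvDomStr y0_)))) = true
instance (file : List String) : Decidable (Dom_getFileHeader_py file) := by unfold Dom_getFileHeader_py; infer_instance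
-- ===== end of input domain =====

-- B separates fence-index discovery from parsing (indices + slice + one comprehension-style
-- fold) instead of A's single flag-threaded loop; objective: alternative decomposition.

-- ===== PORT A =====
def pvGoA : List String → PySem.Dict String String → Bool → PySem.Dict String String
  | [], header, _ => header
  | line :: rest, header, inHeader =>
    if PySem.Str.strip ((((PySem.Str.split? line "\n").getD [])).headD "") == "---" then
      if inHeader then header else pvGoA rest header true
    else
      if inHeader then
        let splittedLine := ((PySem.Str.split? line ":").getD [])
        let key := PySem.Str.strip (splittedLine.headD "")
        let value := PySem.Str.strip (splittedLine.getLast?.getD "")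
        pvGoA rest (header.insert key value) inHeader
      else pvGoA rest header inHeader

def getFileHeader_py (file : List String) : List (String × String) :=
  (pvGoA file PySem.Dict.empty false).items

-- ===== PORT B =====
def pvFence (line : String) : Bool :=
  PySem.Str.strip ((((PySem.Str.split? line "\n").getD [])).headD "") == "---"

def pvParseStep (h : PySem.Dict String String) (line : String) : PySem.Dict String String :=
  h.insert (PySem.Str.strip ((((PySem.Str.split? line ":").getD [])).headD ""))
           (PySem.Str.strip ((((PySem.Str.split? line ":").getD [])).getLast?.getD ""))

def getFileHeader_py_alt (file : List String) : List (String × String) :=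
  let fences := ((PySem.List.enumerate file 0).filter (fun p => pvFence p.2)).map (·.1)
  match fences with
  | [] => []
  | s :: rest =>
    let e : Int := match rest with
      | [] => (file.length : Int)
      | e' :: _ => e'
    ((PySem.List.slice file (some (s + 1)) (some e)).foldl pvParseStep PySem.Dict.empty).items

-- ===== PRECONDITION & SPEC =====
def Spec_getFileHeader_py (file : List String) (out : List (String × String)) : Prop := out = getFileHeader_py_alt file
instance (file : List String) (out : List (String × String)) : Decidable (Spec_getFileHeader_py file out) := by unfold Spec_getFileHeader_py; infer_instance

-- ===== CLAIM (what is proved, stated in full; the proofs are below) =====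
def Claim_equal_getFileHeader_py : Prop := ∀ (file : List String), Dom_getFileHeader_py file → Spec_getFileHeader_py file (getFileHeader_py file)

-- ===== LEMMAS AND PROOFS =====

-- common canonical form: parse the lines strictly between the first fence and the next one
def pvCanon (file : List String) : List (String × String) :=
  match file.dropWhile (fun l => !pvFence l) with
  | [] => []
  | _ :: suf =>
    ((suf.takeWhile (fun l => !pvFence l)).foldl pvParseStep PySem.Dict.empty).items

-- fence indices starting from offset n, as B computes them
def pvFencesFrom (n : Int) (l : List String) : List Int :=
  ((PySem.List.enumerate l n).filter (fun p => pvFence p.2)).map (·.1)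

theorem pvGoA_true (l : List String) (h : PySem.Dict String String) :
    pvGoA l h true = (l.takeWhile (fun x => !pvFence x)).foldl pvParseStep h := by
  induction l generalizing h with
  | nil => rfl
  | cons x xs ih =>
    by_cases hx : pvFence x
    · simp [pvFence] at hx
      simp [pvGoA, hx, pvFence]
    · simp [pvFence] at hx
      simp [pvGoA, hx, pvFence, ih, pvParseStep]

theorem pvA_eq_canon (file : List String) : getFileHeader_py file = pvCanon file := by
  unfold getFileHeader_py
  induction file with
  | nil => rfl
  | cons x xs ih =>
    cases hx : pvFence x with
    | true =>
      have hx' : PySem.Str.strip (((PySem.Str.split? x "\n").getD []).head?.getD "") = "---" := by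
        have h2 := hx; simp [pvFence] at h2; exact h2
      simp [pvGoA, hx', pvGoA_true, pvCanon, hx]
    | false =>
      have hx' : ¬ PySem.Str.strip (((PySem.Str.split? x "\n").getD []).head?.getD "") = "---" := by
        have h2 := hx; simp [pvFence] at h2; exact h2
      have hc : pvCanon (x :: xs) = pvCanon xs := by
        simp [pvCanon, hx]
      rw [hc, ← ih]
      simp [pvGoA, hx']

theorem pvFencesFrom_spec (l : List String) (n : Nat) :
    pvFencesFrom (n : Int) l =
      match l.dropWhile (fun x => !pvFence x) with
      | [] => []
      | _ :: suf =>
        ((n + (l.takeWhile (fun x => !pvFence x)).length : Nat) : Int) ::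
          pvFencesFrom ((n + (l.takeWhile (fun x => !pvFence x)).length + 1 : Nat) : Int) suf := by
  induction l generalizing n with
  | nil => rfl
  | cons x xs ih =>
    cases hx : pvFence x with
    | true =>
      simp [pvFencesFrom, PySem.List.enumerate_cons, hx]
    | false =>
      have h1 := ih (n + 1)
      simp [pvFencesFrom, PySem.List.enumerate_cons, hx] at h1 ⊢
      rw [h1]
      generalize xs.dropWhile (fun x => !pvFence x) = d
      cases d with
      | nil => rfl
      | cons g t =>
        push_cast
        ring_nf

theorem pvB_eq_canon (file : List String) : getFileHeader_py_alt file = pvCanon file := by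
  have h0 := pvFencesFrom_spec file 0
  have hsplit := List.takeWhile_append_dropWhile (p := fun x => !pvFence x) (l := file)
  have hfences : ((PySem.List.enumerate file 0).filter (fun q => pvFence q.2)).map (·.1)
      = pvFencesFrom (0 : Int) file := by
    simp [pvFencesFrom]
  rw [Nat.cast_zero] at h0
  unfold getFileHeader_py_alt pvCanon
  cases hdrop : file.dropWhile (fun x => !pvFence x) with
  | nil =>
    rw [hdrop] at h0
    rw [hfences]
    simp [h0]
  | cons f suf =>
    rw [hdrop] at h0
    push_cast at h0
    set p := file.takeWhile (fun x => !pvFence x) with hp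
    have hfile : file = (p ++ [f]) ++ suf := by
      conv_lhs => rw [← hsplit, hdrop]
      simp
    have hdropn : file.drop (p.length + 1) = suf := by
      conv_lhs => rw [hfile]
      have hl : (p ++ [f]).length = p.length + 1 := by simp
      rw [← hl, List.drop_left]
    have hlen : file.length = p.length + 1 + suf.length := by
      rw [hfile]; simp; omega
    rw [hfences]
    simp only [h0]
    have h2 := pvFencesFrom_spec suf (p.length + 1)
    cases hd2 : suf.dropWhile (fun x => !pvFence x) with
    | nil =>
      rw [hd2] at h2
      push_cast at h2
      have htw : suf.takeWhile (fun x => !pvFence x) = suf := by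
        have h3 := List.takeWhile_append_dropWhile (p := fun x => !pvFence x) (l := suf)
        rw [hd2, List.append_nil] at h3
        exact h3
      have hcast : ((p.length : Int) + 1) = ((p.length + 1 : Nat) : Int) := by push_cast; ring
      have hslice : PySem.List.slice file (some ((p.length : Int) + 1)) (some (file.length : Int)) = suf := by
        rw [hcast, PySem.List.slice_natCast, hdropn]
        have : file.length - (p.length + 1) = suf.length := by omega
        rw [this, List.take_length]
      simp [h2, hslice, htw]
    | cons g t =>
      rw [hd2] at h2
      push_cast at h2
      set q := suf.takeWhile (fun x => !pvFence x) with hq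
      have hsuf : suf = q ++ g :: t := by
        conv_lhs => rw [← List.takeWhile_append_dropWhile (p := fun x => !pvFence x) (l := suf), hd2]
      have hcast : ((p.length : Int) + 1) = ((p.length + 1 : Nat) : Int) := by push_cast; ring
      have hcast2 : ((p.length : Int) + 1 + (q.length : Int)) = ((p.length + 1 + q.length : Nat) : Int) := by
        push_cast; ring
      have hslice : PySem.List.slice file (some ((p.length : Int) + 1))
          (some ((p.length : Int) + 1 + (q.length : Int))) = q := by
        have hcast2' : (((p.length + 1 : Nat) : Int) + (q.length : Int)) = ((p.length + 1 + q.length : Nat) : Int) := by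
          push_cast; ring
        rw [hcast, hcast2', PySem.List.slice_natCast, hdropn]
        have harith : p.length + 1 + q.length - (p.length + 1) = q.length := by omega
        rw [harith]
        conv_lhs => rw [hsuf, List.take_left]
      simp [h2]
      rw [hslice]

-- ===== VERDICT (by name: the statement is the Claim_ definition above) =====
theorem getFileHeader_py_spec : Claim_equal_getFileHeader_py := by
  intro file _
  unfold Spec_getFileHeader_py
  rw [pvA_eq_canon, pvB_eq_canon]
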